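-- pv_equiv track=rewrite | github.com/hfbw03/python-exercises | Codewars/colorChoice.py | checkchoose
-- ===== SOURCE A (Python) =====
-- import math
--
-- def checkchoose(x, m):
--
--     # Check for negatives
--     if x < 0 or m < 0 or x > math.factorial(m):
--         return(-1)
--
--     # Rearrange the formula for combination, iterate until m
--     for n in range(m + 1):
--         result = (math.factorial(m)) // (math.factorial(n) * math.factorial(m - n))
--         if result == x:
--             return n
--
--     # If n is not found
--     return(-1)
-- ===== SOURCE B (Python) =====
-- def checkchoose(x, m):
--     if x < 0 or m < 0:
--         return -1
--     c = 1  # C(m, 0), updated incrementally via C(m,n+1) = C(m,n)*(m-n)//(n+1)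
--     for n in range(m + 1):
--         if c == x:
--             return n
--         c = c * (m - n) // (n + 1)
--     return -1
-- ===== Notes on version B (the rewrite author's own statement) =====
-- stated objective: faster
-- what changed: Replaces the per-iteration recomputation of three factorials with a single running binomial coefficient updated by C(m,n+1)=C(m,n)*(m-n)//(n+1); the x>m! pre-check becomes unnecessary since C(m,n) <= m! so no match exists then.
import Mathlib
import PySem

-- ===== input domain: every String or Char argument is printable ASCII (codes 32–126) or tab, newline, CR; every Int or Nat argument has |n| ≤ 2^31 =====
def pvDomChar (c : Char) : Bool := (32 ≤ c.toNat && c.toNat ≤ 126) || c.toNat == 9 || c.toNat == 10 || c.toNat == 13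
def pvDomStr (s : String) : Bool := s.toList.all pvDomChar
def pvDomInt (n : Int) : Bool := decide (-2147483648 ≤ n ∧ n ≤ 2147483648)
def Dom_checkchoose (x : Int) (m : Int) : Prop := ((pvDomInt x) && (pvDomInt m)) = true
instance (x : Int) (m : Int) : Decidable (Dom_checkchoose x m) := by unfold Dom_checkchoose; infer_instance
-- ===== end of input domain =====

-- B maintains one running binomial coefficient (C(m,n+1) = C(m,n)*(m-n)//(n+1)) instead of
-- recomputing three factorials per iteration; the x > m! pre-check is dropped as redundant.

-- ===== PORT A =====
-- math.factorial(k): only called with k ≥ 0 in A (guarded); exact on that domain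
def pyFact (k : Int) : Int := (Nat.factorial k.toNat : Int)

-- the for-loop with early return = find? over range(m+1)
def checkchoose (x : Int) (m : Int) : Int :=
  if x < 0 ∨ m < 0 ∨ x > pyFact m then -1
  else
    match (PySem.List.pyRange 0 (m + 1) 1).find?
        (fun n => PySem.Int.floordiv (pyFact m) (pyFact n * pyFact (m - n)) == x) with
    | some n => n
    | none => -1

-- ===== PORT B =====
-- the loop over n with running coefficient c, as structural recursion on the trip count
def altGo (x m : Int) : Int → Int → Nat → Int
  | _, _, 0 => -1
  | c, n, Nat.succ k =>
      if c = x then n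
      else altGo x m (PySem.Int.floordiv (c * (m - n)) (n + 1)) (n + 1) k

def checkchoose_alt (x : Int) (m : Int) : Int :=
  if x < 0 ∨ m < 0 then -1 else altGo x m 1 0 (m + 1).toNat

-- ===== PRECONDITION & SPEC =====
def Spec_checkchoose (x : Int) (m : Int) (out : Int) : Prop := out = checkchoose_alt x m
instance (x : Int) (m : Int) (out : Int) : Decidable (Spec_checkchoose x m out) := by unfold Spec_checkchoose; infer_instance

-- ===== CLAIM (what is proved, stated in full; the proofs are below) =====
def Claim_equal_checkchoose : Prop := ∀ (x : Int) (m : Int), Dom_checkchoose x m → Spec_checkchoose x m (checkchoose x m)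

-- ===== LEMMAS AND PROOFS =====

-- common reference: first index j ≤ … with C(M,j) = x, scanning k steps from j
def findC (x : Int) (M : Nat) : Nat → Nat → Int
  | _, 0 => -1
  | j, Nat.succ k => if (M.choose j : Int) = x then (j : Int) else findC x M (j + 1) k

-- A's per-step formula computes the binomial coefficient
lemma resultA_eq (M j : Nat) (hj : j ≤ M) :
    PySem.Int.floordiv (pyFact (M : Int)) (pyFact (j : Int) * pyFact ((M : Int) - (j : Int)))
      = (M.choose j : Int) := by
  have hsub : ((M : Int) - (j : Int)) = ((M - j : Nat) : Int) := by omega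
  simp only [pyFact, hsub, Int.toNat_natCast]
  rw [← Nat.cast_mul, PySem.Int.floordiv_natCast]
  rw [← Nat.choose_eq_factorial_div_factorial hj]

-- B's update step computes the next binomial coefficient
lemma stepB_eq (M j : Nat) (hj : j ≤ M) :
    PySem.Int.floordiv ((M.choose j : Int) * ((M : Int) - (j : Int)) ) ((j : Int) + 1)
      = (M.choose (j + 1) : Int) := by
  have hsub : ((M : Int) - (j : Int)) = ((M - j : Nat) : Int) := by omega
  rw [hsub, ← Nat.cast_mul, ← Nat.cast_one (R := Int), ← Nat.cast_add,
    PySem.Int.floordiv_natCast]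
  have h := Nat.choose_succ_right_eq M j
  -- choose M (j+1) * (j+1) = choose M j * (M - j)
  have : M.choose j * (M - j) / (j + 1) = M.choose (j + 1) := by
    rw [← h]; exact Nat.mul_div_cancel _ (Nat.succ_pos j)
  rw [this]

-- B's loop equals findC
lemma altGo_eq_findC (x : Int) (M : Nat) :
    ∀ k j, j + k ≤ M + 1 →
      altGo x (M : Int) (M.choose j : Int) (j : Int) k = findC x M j k := by
  intro k
  induction k with
  | zero => intro j _; rfl
  | succ k ih =>
      intro j hjk
      simp only [altGo, findC]
      split
      · rfl
      · have hj : j ≤ M := by omega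
        rw [stepB_eq M j hj]
        have : ((j : Int) + 1) = ((j + 1 : Nat) : Int) := by push_cast; ring
        rw [this, ih (j + 1) (by omega)]

-- A's find? over the range equals findC
lemma findA_eq_findC (x : Int) (M : Nat) :
    ∀ k j, j + k = M + 1 →
      (match (PySem.List.pyRange (j : Int) ((M : Int) + 1) 1).find?
          (fun n => PySem.Int.floordiv (pyFact (M : Int)) (pyFact n * pyFact ((M : Int) - n)) == x) with
        | some n => n
        | none => -1) = findC x M j k := by
  intro k
  induction k with
  | zero =>
      intro j hj
      have hj' : (j : Int) = (M : Int) + 1 := by omega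
      rw [hj', PySem.List.pyRange_one_eq_nil (by omega)]
      rfl
  | succ k ih =>
      intro j hjk
      have hlt : (j : Int) < (M : Int) + 1 := by omega
      rw [PySem.List.pyRange_one_cons hlt]
      simp only [List.find?_cons]
      rw [resultA_eq M j (by omega)]
      by_cases hx : (M.choose j : Int) = x
      · simp [hx, findC]
      · have hb : ((M.choose j : Int) == x) = false := by simp [hx]
        rw [hb]
        simp only [findC, hx, if_false]
        have : ((j : Int) + 1) = ((j + 1 : Nat) : Int) := by push_cast; ring
        rw [this, ih (j + 1) (by omega)]

-- every binomial coefficient is at most M!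
lemma choose_le_fact (M j : Nat) : M.choose j ≤ Nat.factorial M := by
  by_cases hj : j ≤ M
  · have h := Nat.choose_mul_factorial_mul_factorial hj
    calc M.choose j ≤ M.choose j * (Nat.factorial j * Nat.factorial (M - j)) :=
          Nat.le_mul_of_pos_right _ (Nat.mul_pos (Nat.factorial_pos _) (Nat.factorial_pos _))
      _ = Nat.factorial M := by rw [← h]; ring
  · rw [Nat.choose_eq_zero_of_lt (by omega)]; exact Nat.zero_le _
-- if no coefficient equals x, findC returns -1
lemma findC_eq_neg_one (x : Int) (M : Nat) (h : ∀ i, (M.choose i : Int) ≠ x) :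
    ∀ k j, findC x M j k = -1 := by
  intro k
  induction k with
  | zero => intro j; rfl
  | succ k ih => intro j; simp only [findC, h j, if_false]; exact ih (j + 1)

theorem checkchoose_eq (x m : Int) : checkchoose x m = checkchoose_alt x m := by
  unfold checkchoose checkchoose_alt
  by_cases hneg : x < 0 ∨ m < 0
  · rcases hneg with h | h <;> simp [h]
  · push Not at hneg
    obtain ⟨hx, hm⟩ := hneg
    set M := m.toNat with hM
    have hmM : m = (M : Int) := by omega
    have hB : altGo x m 1 0 (m + 1).toNat = findC x M 0 (M + 1) := by
      have h1 : (m + 1).toNat = M + 1 := by omega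
      have h0 : (1 : Int) = (M.choose 0 : Int) := by simp
      rw [h1, h0, hmM]
      exact altGo_eq_findC x M (M + 1) 0 (by omega)
    have hA : (match (PySem.List.pyRange 0 (m + 1) 1).find?
          (fun n => PySem.Int.floordiv (pyFact m) (pyFact n * pyFact (m - n)) == x) with
        | some n => n
        | none => -1) = findC x M 0 (M + 1) := by
      rw [hmM]
      exact findA_eq_findC x M (M + 1) 0 (by omega) |>.trans rfl
    by_cases hbig : x > pyFact m
    · have hfa : pyFact m = (Nat.factorial M : Int) := by simp [pyFact, hM]
      have hnone : ∀ i, (M.choose i : Int) ≠ x := by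
        intro i hi
        have := choose_le_fact M i
        rw [hfa] at hbig
        omega
      rw [if_pos (Or.inr (Or.inr hbig)), if_neg (by omega), hB,
        findC_eq_neg_one x M hnone (M + 1) 0]
    · rw [if_neg (by push Not; exact ⟨hx, hm, by omega⟩), if_neg (by omega), hB, hA]

-- ===== VERDICT (by name: the statement is the Claim_ definition above) =====
theorem checkchoose_spec : Claim_equal_checkchoose := by
  intro x m _
  unfold Spec_checkchoose
  exact checkchoose_eq x m
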